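-- pv_equiv track=rewrite | github.com/actorpus/SCPUAS | main.py | generate_mif
-- ===== SOURCE A (Python) =====
-- AssembledStreamStruct = list[list[int]]
--
-- def generate_dat(stream: AssembledStreamStruct) -> str:
--     output = ""
--
--     for i, inst in enumerate(stream):
--         output += f"{i:04} {inst[0]:08b}{inst[1]:08b}\n"
--
--     return output
--
-- def generate_mif(stream: AssembledStreamStruct) -> str:
--     output = """
-- DEPTH = 32;           -- The size of memory in words
-- WIDTH = 16;           -- The size of data in bits
-- ADDRESS_RADIX = HEX;  -- The radix for address values
-- DATA_RADIX = BIN;     -- The radix for data values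
-- CONTENT               -- start of (address : data pairs)
-- BEGIN
-- """.strip()
--
--     cheat = generate_dat(stream).split("\n")
--     cheat = [a + " : " + b + ";" for a, b in [i.split(" ") for i in cheat if i]]
--     output += "\n"
--     output += "\n".join(cheat)
--
--     output += "\nEND;\n"
--
--     return output
-- ===== SOURCE B (Python) =====
-- def generate_mif(stream):
--     header = """
-- DEPTH = 32;           -- The size of memory in words
-- WIDTH = 16;           -- The size of data in bits
-- ADDRESS_RADIX = HEX;  -- The radix for address values
-- DATA_RADIX = BIN;     -- The radix for data values
-- CONTENT               -- start of (address : data pairs)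
-- BEGIN
-- """.strip()
--     lines = [f"{i:04} : {inst[0]:08b}{inst[1]:08b};" for i, inst in enumerate(stream)]
--     return header + "\n" + "\n".join(lines) + "\nEND;\n"
-- ===== Notes on version B (the rewrite author's own statement) =====
-- stated objective: simpler
-- what changed: B formats each MIF line directly in one pass over enumerate(stream) instead of A's round-trip of generating DAT text, splitting it on newlines, filtering, re-splitting each line on a space and re-joining.
import Mathlib
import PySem

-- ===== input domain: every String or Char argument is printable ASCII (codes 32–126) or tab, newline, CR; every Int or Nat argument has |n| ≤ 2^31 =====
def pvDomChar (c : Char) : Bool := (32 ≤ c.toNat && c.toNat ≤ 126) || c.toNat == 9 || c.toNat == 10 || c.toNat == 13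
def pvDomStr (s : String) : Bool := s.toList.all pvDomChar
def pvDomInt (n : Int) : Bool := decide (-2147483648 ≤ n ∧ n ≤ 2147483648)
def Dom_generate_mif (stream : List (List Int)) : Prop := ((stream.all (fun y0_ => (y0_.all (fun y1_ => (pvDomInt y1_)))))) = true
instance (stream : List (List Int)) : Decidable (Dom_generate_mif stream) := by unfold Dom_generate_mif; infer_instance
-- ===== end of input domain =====

-- B drops A's generate_dat round-trip (build DAT text, split, filter, re-split, re-join) and formats each
-- MIF line directly in one pass; objective: simpler. Equivalence is about the return value (no mutation).

-- shared formatting primitives (ports of the f-string format specs; exact on all Int)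
-- f"{n:04}" = str(n) zero-filled to width 4 (sign stays in front)
def pvDec4 (n : Int) : List Char := PySem.Chars.zfill (PySem.Int.toChars n) 4
-- f"{n:08b}" = format(n, 'b') zero-filled to width 8 (sign stays in front)
def pvBin8 (n : Int) : List Char := PySem.Chars.zfill (PySem.Int.toBinChars n) 8
-- the triple-quoted header literal, .strip()ped as in the source
def pvHeader : List Char := PySem.Chars.strip ("\nDEPTH = 32;           -- The size of memory in words\nWIDTH = 16;           -- The size of data in bits\nADDRESS_RADIX = HEX;  -- The radix for address values\nDATA_RADIX = BIN;     -- The radix for data values\nCONTENT               -- start of (address : data pairs)\nBEGIN\n").toList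

-- ===== PORT A =====
def generate_dat (stream : List (List Int)) : List Char :=
  (PySem.List.enumerate stream).foldl
    (fun output p =>
      output ++ (pvDec4 p.1 ++ [' '] ++ pvBin8 (PySem.List.pyGetD p.2 0 0) ++ pvBin8 (PySem.List.pyGetD p.2 1 0) ++ ['\n']))
    []

def generate_mif (stream : List (List Int)) : String :=
  let output := pvHeader
  let cheat := PySem.Chars.splitOn (generate_dat stream) ['\n']
  let cheat2 := ((cheat.filter (fun i => !i.isEmpty)).map (fun i => PySem.Chars.splitOn i [' '])).map
      (fun ab => ab.getD 0 [] ++ (" : ".toList) ++ ab.getD 1 [] ++ [';'])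
  let output := output ++ ['\n'] ++ PySem.Chars.join ['\n'] cheat2
  let output := output ++ ("\nEND;\n".toList)
  String.ofList output

-- ===== PORT B =====
def generate_mif_alt (stream : List (List Int)) : String :=
  let lines := (PySem.List.enumerate stream).map
      (fun p => pvDec4 p.1 ++ (" : ".toList) ++ pvBin8 (PySem.List.pyGetD p.2 0 0) ++ pvBin8 (PySem.List.pyGetD p.2 1 0) ++ [';'])
  String.ofList (pvHeader ++ ['\n'] ++ PySem.Chars.join ['\n'] lines ++ ("\nEND;\n".toList))

-- ===== PRECONDITION & SPEC =====
-- A (and B) raise IndexError on inst[1] when an instruction has fewer than two entries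
def Pre_generate_mif (stream : List (List Int)) : Prop := ∀ inst ∈ stream, 2 ≤ inst.length
instance (stream : List (List Int)) : Decidable (Pre_generate_mif stream) := by unfold Pre_generate_mif; infer_instance
def pvWitness_generate_mif : List (List Int) := [[0, 0], [255, 3]]

def Spec_generate_mif (stream : List (List Int)) (out : String) : Prop := out = generate_mif_alt stream
instance (stream : List (List Int)) (out : String) : Decidable (Spec_generate_mif stream out) := by unfold Spec_generate_mif; infer_instance

-- ===== CLAIM (what is proved, stated in full; the proofs are below) =====
def Claim_equal_generate_mif : Prop := ∀ (stream : List (List Int)), Dom_generate_mif stream → Pre_generate_mif stream → Spec_generate_mif stream (generate_mif stream)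

-- ===== LEMMAS AND PROOFS =====

-- per-line pieces of A's DAT text and B's MIF lines (proof-side abbreviations)
def pvCore (p : Int × List Int) : List Char :=
  pvDec4 p.1 ++ [' '] ++ pvBin8 (PySem.List.pyGetD p.2 0 0) ++ pvBin8 (PySem.List.pyGetD p.2 1 0)

theorem pv_digitChar_ne {d : Nat} (hd : d < 16) : Nat.digitChar d ≠ ' ' ∧ Nat.digitChar d ≠ '\n' := by
  interval_cases d <;> exact ⟨by decide, by decide⟩

theorem pv_mem_toDigitsCore (b : Nat) (hb : 0 < b) : ∀ (fuel n : Nat) (ds : List Char) (c : Char),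
    c ∈ Nat.toDigitsCore b fuel n ds → (∃ d, d < b ∧ c = Nat.digitChar d) ∨ c ∈ ds := by
  intro fuel
  induction fuel with
  | zero => intro n ds c h; exact Or.inr h
  | succ fuel ih =>
    intro n ds c h
    rw [Nat.toDigitsCore] at h
    split at h
    · rcases List.mem_cons.1 h with rfl | h
      · exact Or.inl ⟨_, Nat.mod_lt _ hb, rfl⟩
      · exact Or.inr h
    · rcases ih _ _ _ h with h' | h'
      · exact Or.inl h'
      · rcases List.mem_cons.1 h' with rfl | h'
        · exact Or.inl ⟨_, Nat.mod_lt _ hb, rfl⟩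
        · exact Or.inr h'

theorem pv_mem_zfill {c : Char} {cs : List Char} {w : Int}
    (hc : c ∈ PySem.Chars.zfill cs w) : c ∈ cs ∨ c = '0' := by
  unfold PySem.Chars.zfill at hc
  split at hc
  · exact Or.inl hc
  · split at hc
    · rename_i c' rest
      split at hc
      · rcases List.mem_cons.1 hc with rfl | hc
        · exact Or.inl List.mem_cons_self
        · rcases List.mem_append.1 hc with hc | hc
          · exact Or.inr (List.eq_of_mem_replicate hc)
          · exact Or.inl (List.mem_cons_of_mem _ hc)
      · rcases List.mem_append.1 hc with hc | hc
        · exact Or.inr (List.eq_of_mem_replicate hc)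
        · exact Or.inl hc
    · exact Or.inr (List.eq_of_mem_replicate hc)

theorem pv_mem_int_chars {c : Char} {n : Int}
    (h : c ∈ PySem.Int.toChars n ∨ c ∈ PySem.Int.toBinChars n) : c ≠ ' ' ∧ c ≠ '\n' := by
  have base : ∀ (b m : Nat), 0 < b → b ≤ 16 → c ∈ Nat.toDigits b m → c ≠ ' ' ∧ c ≠ '\n' := by
    intro b m hb hb16 hm
    rw [Nat.toDigits] at hm
    rcases pv_mem_toDigitsCore b hb _ _ _ _ hm with ⟨d, hd, rfl⟩ | h'
    · exact pv_digitChar_ne (lt_of_lt_of_le hd hb16)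
    · simp at h'
  rcases h with h | h
  · unfold PySem.Int.toChars at h
    split at h
    · rcases List.mem_cons.1 h with rfl | h
      · exact ⟨by decide, by decide⟩
      · exact base 10 _ (by norm_num) (by norm_num) h
    · exact base 10 _ (by norm_num) (by norm_num) h
  · unfold PySem.Int.toBinChars at h
    split at h
    · rcases List.mem_cons.1 h with rfl | h
      · exact ⟨by decide, by decide⟩
      · exact base 2 _ (by norm_num) (by norm_num) h
    · exact base 2 _ (by norm_num) (by norm_num) h

theorem pv_dec4_clean {c : Char} {n : Int} (h : c ∈ pvDec4 n) : c ≠ ' ' ∧ c ≠ '\n' := by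
  rcases pv_mem_zfill h with h' | rfl
  · exact pv_mem_int_chars (Or.inl h')
  · exact ⟨by decide, by decide⟩

theorem pv_bin8_clean {c : Char} {n : Int} (h : c ∈ pvBin8 n) : c ≠ ' ' ∧ c ≠ '\n' := by
  rcases pv_mem_zfill h with h' | rfl
  · exact pv_mem_int_chars (Or.inr h')
  · exact ⟨by decide, by decide⟩

-- splitOn.go on a separator-free segment
theorem pv_go_seg (c : Char) : ∀ (seg : List Char) (fuel : Nat) (rest cur : List Char) (acc : List (List Char)),
    c ∉ seg →
    PySem.Chars.splitOn.go [c] (fuel + seg.length) (seg ++ rest) cur acc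
      = PySem.Chars.splitOn.go [c] fuel rest (seg.reverse ++ cur) acc := by
  intro seg
  induction seg with
  | nil => intro fuel rest cur acc _; simp
  | cons a seg ih =>
    intro fuel rest cur acc hnot
    have ha : a ≠ c := fun h => hnot (h ▸ List.mem_cons_self)
    have hfl : fuel + (a :: seg).length = (fuel + seg.length) + 1 := by simp; omega
    rw [hfl]
    show PySem.Chars.splitOn.go [c] (fuel + seg.length + 1) (a :: (seg ++ rest)) cur acc = _
    rw [PySem.Chars.splitOn.go]
    have hpre : [c].isPrefixOf (a :: (seg ++ rest)) = false := by
      simp [List.isPrefixOf, Ne.symm ha]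
    simp only [hpre, Bool.false_eq_true, if_false]
    rw [ih _ _ _ _ (fun h => hnot (List.mem_cons_of_mem a h))]
    simp

-- splitOn.go consuming one separator
theorem pv_go_sep (c : Char) (fuel : Nat) (rest cur : List Char) (acc : List (List Char)) :
    PySem.Chars.splitOn.go [c] (fuel + 1) (c :: rest) cur acc
      = PySem.Chars.splitOn.go [c] fuel rest [] (cur.reverse :: acc) := by
  rw [PySem.Chars.splitOn.go]
  simp [List.isPrefixOf]

-- splitOn.go at the end of input
theorem pv_go_end (c : Char) (fuel : Nat) (cur : List Char) (acc : List (List Char)) :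
    PySem.Chars.splitOn.go [c] fuel [] cur acc = (cur.reverse :: acc).reverse := by
  cases fuel <;> rw [PySem.Chars.splitOn.go] <;> simp

-- splitting a flatMap of separator-terminated clean lines recovers the lines plus the trailing empty piece
theorem pv_go_flat (c : Char) : ∀ (lines : List (List Char)) (fuel : Nat) (acc : List (List Char)),
    (∀ l ∈ lines, c ∉ l) →
    PySem.Chars.splitOn.go [c] ((List.flatMap (fun l => l ++ [c]) lines).length + (fuel + 1))
      (List.flatMap (fun l => l ++ [c]) lines) [] acc
      = acc.reverse ++ (lines ++ [[]]) := by
  intro lines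
  induction lines with
  | nil => intro fuel acc _; simp [pv_go_end]
  | cons l ls ih =>
    intro fuel acc h
    have hflat : List.flatMap (fun l => l ++ [c]) (l :: ls)
        = l ++ (c :: List.flatMap (fun l => l ++ [c]) ls) := by simp
    rw [hflat]
    have hlen : (l ++ (c :: List.flatMap (fun l => l ++ [c]) ls)).length + (fuel + 1)
        = (((List.flatMap (fun l => l ++ [c]) ls).length + (fuel + 1)) + 1) + l.length := by
      simp; omega
    rw [hlen, pv_go_seg c l _ _ _ _ (h l List.mem_cons_self), pv_go_sep]
    simp only [List.append_nil, List.reverse_reverse]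
    rw [ih fuel (l :: acc) (fun x hx => h x (List.mem_cons_of_mem l hx))]
    simp

theorem pv_splitOn_flat (c : Char) (lines : List (List Char)) (h : ∀ l ∈ lines, c ∉ l) :
    PySem.Chars.splitOn (List.flatMap (fun l => l ++ [c]) lines) [c] = lines ++ [[]] := by
  unfold PySem.Chars.splitOn
  have := pv_go_flat c lines 0 [] h
  simpa using this

-- finishing a separator-free tail
theorem pv_go_last (c : Char) (b : List Char) (acc : List (List Char)) (hb : c ∉ b) :
    PySem.Chars.splitOn.go [c] (b.length + 1) b [] acc = (b :: acc).reverse := by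
  have h := pv_go_seg c b 1 [] [] acc hb
  rw [List.append_nil] at h
  rw [Nat.add_comm] at h
  rw [pv_go_end] at h
  simpa using h

-- splitting a single-separator line into its two halves
theorem pv_splitOn_pair (c : Char) (a b : List Char) (ha : c ∉ a) (hb : c ∉ b) :
    PySem.Chars.splitOn (a ++ c :: b) [c] = [a, b] := by
  unfold PySem.Chars.splitOn
  have hlen : (a ++ c :: b).length + 1 = ((b.length + 1) + 1) + a.length := by simp; omega
  rw [hlen, pv_go_seg c a _ _ _ _ ha, pv_go_sep]
  rw [pv_go_last c b _ hb]
  simp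

theorem pv_core_no_nl (p : Int × List Int) : '\n' ∉ pvCore p := by
  intro h
  unfold pvCore at h
  rcases List.mem_append.1 h with h | h
  · rcases List.mem_append.1 h with h | h
    · rcases List.mem_append.1 h with h | h
      · exact (pv_dec4_clean h).2 rfl
      · simp at h
    · exact (pv_bin8_clean h).2 rfl
  · exact (pv_bin8_clean h).2 rfl

theorem pv_core_split (p : Int × List Int) :
    PySem.Chars.splitOn (pvCore p) [' ']
      = [pvDec4 p.1, pvBin8 (PySem.List.pyGetD p.2 0 0) ++ pvBin8 (PySem.List.pyGetD p.2 1 0)] := by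
  have hshape : pvCore p
      = pvDec4 p.1 ++ ' ' :: (pvBin8 (PySem.List.pyGetD p.2 0 0) ++ pvBin8 (PySem.List.pyGetD p.2 1 0)) := by
    unfold pvCore; simp
  rw [hshape]
  refine pv_splitOn_pair ' ' _ _ (fun h => (pv_dec4_clean h).1 rfl) ?_
  intro h
  rcases List.mem_append.1 h with h | h <;> exact (pv_bin8_clean h).1 rfl

theorem pv_core_ne_nil (p : Int × List Int) : pvCore p ≠ [] := by
  intro h
  have : (pvCore p).length = 0 := by rw [h]; rfl
  unfold pvCore pvDec4 at this
  simp [PySem.Chars.length_zfill] at this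

-- A's DAT text is the flatMap of newline-terminated core lines
theorem pv_dat_eq (stream : List (List Int)) :
    generate_dat stream
      = List.flatMap (fun l => l ++ ['\n']) ((PySem.List.enumerate stream).map pvCore) := by
  unfold generate_dat
  show List.foldl (fun output p => output ++ (pvCore p ++ ['\n'])) [] (PySem.List.enumerate stream) = _
  rw [PySem.List.foldl_append_eq_flatMap (fun p => pvCore p ++ ['\n'])]
  simp [List.flatMap_map]

-- ===== VERDICT (by name: the statement is the Claim_ definition above) =====
set_option maxRecDepth 8192 in
theorem generate_mif_spec : Claim_equal_generate_mif := by
  intro stream _ _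
  unfold Spec_generate_mif generate_mif generate_mif_alt
  apply congrArg String.ofList
  rw [pv_dat_eq,
      pv_splitOn_flat '\n' _ (fun l hl => by
        rcases List.mem_map.1 hl with ⟨p, _, rfl⟩
        exact pv_core_no_nl p)]
  have hfilter : (((PySem.List.enumerate stream).map pvCore ++ [[]]).filter (fun i => !i.isEmpty))
      = (PySem.List.enumerate stream).map pvCore := by
    rw [List.filter_append]
    have h1 : ((PySem.List.enumerate stream).map pvCore).filter (fun i => !i.isEmpty)
        = (PySem.List.enumerate stream).map pvCore := by
      apply List.filter_eq_self.2
      intro l hl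
      rcases List.mem_map.1 hl with ⟨p, _, rfl⟩
      simp [pv_core_ne_nil p]
    rw [h1]; simp
  rw [hfilter, List.map_map, List.map_map]
  have hmap : (((fun ab => ab.getD 0 [] ++ " : ".toList ++ ab.getD 1 [] ++ [';']) ∘ fun i => PySem.Chars.splitOn i [' ']) ∘ pvCore)
      = (fun p : Int × List Int => pvDec4 p.1 ++ " : ".toList ++ pvBin8 (PySem.List.pyGetD p.2 0 0) ++ pvBin8 (PySem.List.pyGetD p.2 1 0) ++ [';']) := by
    funext p
    simp only [Function.comp]
    rw [pv_core_split]
    simp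
  rw [hmap]
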